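-- pv_equiv track=rewrite | github.com/nickchen111/Leetcode | Array/3819. Rotate Non Negative Elements.py | rotateElements
-- ===== SOURCE A (Python) =====
-- from typing import List
--
-- def rotateElements(nums: List[int], k: int) -> List[int]:
--     a = [x for x in nums if x >= 0]
--     m = len(a)
--     j = k
--     for i, x in enumerate(nums):
--         if x >= 0:
--             nums[i] = a[j % m]
--             j += 1
--     return nums
-- ===== SOURCE B (Python) =====
-- from typing import List
--
-- def rotateElements(nums: List[int], k: int) -> List[int]:
--     # pair each non-negative element with its position
--     pairs = [(i, x) for i, x in enumerate(nums) if x >= 0]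
--     m = len(pairs)
--     if m:
--         r = k % m
--         vals = [x for _, x in pairs]
--         # left-rotate vals by r with the classic three-reversal algorithm
--         vals[:r] = reversed(vals[:r])
--         vals[r:] = reversed(vals[r:])
--         vals.reverse()
--         # write the rotated values back at the recorded positions
--         for (i, _), v in zip(pairs, vals):
--             nums[i] = v
--     return nums
-- ===== Notes on version B (the rewrite author's own statement) =====
-- stated objective: alternative
-- what changed: B records (position, value) pairs for the non-negative elements, rotates the value list in place with the classic three-reversal rotation algorithm (reverse vals[:r], reverse vals[r:], reverse all), and writes the rotated values back at the recorded positions, instead of A's single pass computing a[j % m] with a running modular counter.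
import Mathlib
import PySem

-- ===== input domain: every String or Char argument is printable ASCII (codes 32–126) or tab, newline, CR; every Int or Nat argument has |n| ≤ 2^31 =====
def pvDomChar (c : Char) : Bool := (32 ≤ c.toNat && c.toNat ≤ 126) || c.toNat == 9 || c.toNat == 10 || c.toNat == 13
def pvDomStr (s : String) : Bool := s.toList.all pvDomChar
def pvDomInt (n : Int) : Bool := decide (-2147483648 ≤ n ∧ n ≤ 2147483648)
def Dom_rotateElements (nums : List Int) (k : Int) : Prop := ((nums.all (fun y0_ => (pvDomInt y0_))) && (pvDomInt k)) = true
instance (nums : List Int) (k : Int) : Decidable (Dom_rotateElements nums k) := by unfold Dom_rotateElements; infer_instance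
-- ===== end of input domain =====

-- B records (position, value) pairs for the non-negative elements, rotates the value list
-- with the classic three-reversal rotation algorithm, and writes the rotated values back at
-- the recorded positions, instead of A's one pass computing a[j % m] with a running modular
-- counter (objective: alternative, same cost).
-- Both Pythons mutate `nums` in place identically; the equivalence proved here is about the return value.

-- ===== PORT A =====
-- the loop `for i, x in enumerate(nums): if x >= 0: nums[i] = a[j % m]; j += 1`
-- (writes rebuilt positionally; when the branch runs a ≠ [], so a[j % m] is always in
-- range and the `.getD 0` totalisation is never used)
def rotALoop (a : List Int) (m : Int) : List Int → Int → List Int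
  | [], _ => []
  | x :: rest, j =>
    if 0 ≤ x then
      ((PySem.List.pyGet? a (PySem.Int.mod j m)).getD 0) :: rotALoop a m rest (j + 1)
    else x :: rotALoop a m rest j

def rotateElements (nums : List Int) (k : Int) : List Int :=
  let a := nums.filter (fun x => decide (0 ≤ x))
  rotALoop a (PySem.List.len a) nums k

-- ===== PORT B =====
-- the write-back loop `for (i, _), v in zip(pairs, vals): nums[i] = v`; every index i comes
-- from enumerate, so 0 ≤ i < len ns and `.set i.toNat` is exactly Python's nums[i] = v
def writeBack : List Int → List ((Int × Int) × Int) → List Int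
  | ns, [] => ns
  | ns, ((i, _), v) :: rest => writeBack (ns.set i.toNat v) rest

def rotateElements_alt (nums : List Int) (k : Int) : List Int :=
  let pairs := (PySem.List.enumerate nums).filter (fun p => decide (0 ≤ p.2))
  let m := pairs.length
  if m = 0 then nums
  else
    -- r = k % m with m > 0, so 0 ≤ r < m and take/drop r.toNat is exactly vals[:r]/vals[r:]
    let r := (PySem.Int.mod k (m : Int)).toNat
    let vals := pairs.map (·.2)
    let rot := ((vals.take r).reverse ++ (vals.drop r).reverse).reverse
    writeBack nums (pairs.zip rot)

-- ===== PRECONDITION & SPEC =====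
def Spec_rotateElements (nums : List Int) (k : Int) (out : List Int) : Prop := out = rotateElements_alt nums k
instance (nums : List Int) (k : Int) (out : List Int) : Decidable (Spec_rotateElements nums k out) := by unfold Spec_rotateElements; infer_instance

-- ===== CLAIM =====
def Claim_equal_rotateElements : Prop := ∀ (nums : List Int) (k : Int), Dom_rotateElements nums k → Spec_rotateElements nums k (rotateElements nums k)

-- ===== LEMMAS AND PROOFS =====

-- if nothing is non-negative, A's loop copies nums unchanged
lemma rotALoop_all_neg (a : List Int) (m : Int) :
    ∀ (nums : List Int) (j : Int), (∀ x ∈ nums, ¬ (0 ≤ x)) → rotALoop a m nums j = nums := by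
  intro nums
  induction nums with
  | nil => intro j h; rfl
  | cons x rest ih =>
    intro j h
    have hx := h x (by simp)
    simp [rotALoop, hx, ih j (fun y hy => h y (by simp [hy]))]

-- A's loop rewritten as replacing each non-negative element, front to back, by the next
-- element of a supplied list (what B's write-back will be reduced to)
def scatterB : List Int → List Int → List Int
  | [], _ => []
  | x :: rest, it =>
    if 0 ≤ x then
      match it with
      | y :: it' => y :: scatterB rest it'
      | [] => x :: scatterB rest []
    else x :: scatterB rest it

lemma scatterB_nil : ∀ (ns : List Int), scatterB ns [] = ns := by
  intro ns
  induction ns with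
  | nil => rfl
  | cons x rest ih => by_cases hx : 0 ≤ x <;> simp [scatterB, hx, ih]

-- setting position pre.length in pre ++ x :: tl replaces x
lemma set_middle (pre : List Int) (x v : Int) (tl : List Int) :
    (pre ++ x :: tl).set pre.length v = pre ++ v :: tl := by
  induction pre with
  | nil => rfl
  | cons p ps ih => simp [ih]

-- B's write-back at the enumerated positions of the non-negative elements is the
-- positional replacement scatterB
lemma writeBack_eq_scatterB :
    ∀ (rest pre : List Int) (rot : List Int),
      writeBack (pre ++ rest)
        (((PySem.List.enumerate rest (pre.length : Int)).filter
            (fun p => decide (0 ≤ p.2))).zip rot) = pre ++ scatterB rest rot := by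
  intro rest
  induction rest with
  | nil => intro pre rot; simp [PySem.List.enumerate_nil, writeBack, scatterB]
  | cons x tl ih =>
    intro pre rot
    rw [PySem.List.enumerate_cons]
    by_cases hx : 0 ≤ x
    · cases rot with
      | nil =>
        simp [hx, writeBack, scatterB, scatterB_nil]
      | cons v vs =>
        have hstep : ((pre.length : Int) : Int).toNat = pre.length := by simp
        simp only [List.filter_cons, decide_eq_true_eq, hx, if_pos, List.zip_cons_cons,
          writeBack, hstep, set_middle]
        have hlen : ((pre.length : Int) + 1) = (((pre ++ [v]).length : Nat) : Int) := by simp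
        have h2 : pre ++ v :: tl = (pre ++ [v]) ++ tl := by simp
        rw [h2, hlen, ih (pre ++ [v]) vs]
        simp [scatterB, hx]
    · have hlen : ((pre.length : Int) + 1) = (((pre ++ [x]).length : Nat) : Int) := by simp
      have h1 : pre ++ x :: tl = (pre ++ [x]) ++ tl := by simp
      simp only [List.filter_cons, decide_eq_true_eq, hx, if_neg, not_false_iff]
      rw [h1, hlen, ih (pre ++ [x]) rot]
      simp [scatterB, hx]

-- the values of the kept enumerate pairs are exactly the filtered list
lemma map_snd_filter_enumerate (nums : List Int) :
    ∀ (s : Int), ((PySem.List.enumerate nums s).filter (fun p => decide (0 ≤ p.2))).map (·.2)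
      = nums.filter (fun x => decide (0 ≤ x)) := by
  induction nums with
  | nil => intro s; simp [PySem.List.enumerate_nil]
  | cons x tl ih =>
    intro s
    rw [PySem.List.enumerate_cons]
    by_cases hx : 0 ≤ x <;> simp [hx, ih (s + 1)]

-- the stream element A reads at counter j
def streamF (a : List Int) (j : Int) : Int :=
  (PySem.List.pyGet? a (PySem.Int.mod j (PySem.List.len a))).getD 0

-- B's scatter over a prefix of the stream equals A's loop, when the prefix is long enough
lemma scatter_stream (a : List Int) :
    ∀ (rest : List Int) (j : Int) (n : Nat),
      rest.countP (fun x => decide (0 ≤ x)) ≤ n →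
      scatterB rest ((List.range n).map (fun (t : Nat) => streamF a (j + (t : Int)))) =
        rotALoop a (PySem.List.len a) rest j := by
  intro rest
  induction rest with
  | nil =>
    intro j n _
    cases (List.range n).map (fun (t : Nat) => streamF a (j + (t : Int))) <;> rfl
  | cons x rest ih =>
    intro j n hn
    by_cases hx : 0 ≤ x
    · have hc : rest.countP (fun x => decide (0 ≤ x)) + 1 ≤ n := by
        simpa [List.countP_cons, hx] using hn
      obtain ⟨n', rfl⟩ : ∃ n', n = n' + 1 := ⟨n - 1, by omega⟩
      have hrange : (List.range (n' + 1)).map (fun (t : Nat) => streamF a (j + (t : Int))) =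
          streamF a j ::
            (List.range n').map (fun (t : Nat) => streamF a ((j + 1) + (t : Int))) := by
        rw [List.range_succ_eq_map, List.map_cons, List.map_map]
        refine congrArg₂ _ (by simp) ?_
        apply List.map_congr_left
        intro t _
        show streamF a (j + ((t + 1 : Nat) : Int)) = streamF a ((j + 1) + (t : Int))
        congr 1
        push_cast
        ring
      rw [hrange]
      simp only [scatterB, rotALoop, if_pos hx]
      rw [ih (j + 1) n' (by omega)]
      rfl
    · have hn' : rest.countP (fun x => decide (0 ≤ x)) ≤ n := by
        simpa [List.countP_cons, hx] using hn
      simp only [scatterB, rotALoop, if_neg hx]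
      rw [ih j n hn']

-- rotating by rn < m, written drop/take, indexes cyclically
lemma drop_append_take_eq_map_range (a : List Int) (rn m : Nat) (hrn : rn < m)
    (hm : a.length = m) :
    a.drop rn ++ a.take rn = (List.range m).map (fun t => a.getD ((rn + t) % m) 0) := by
  apply List.ext_getElem
  · simp; omega
  · intro i h1 h2
    have hi : i < m := by simpa using h2
    rw [List.getElem_map, List.getElem_range]
    by_cases hc : i < m - rn
    · rw [List.getElem_append_left (by simp; omega)]
      rw [List.getElem_drop]
      rw [Nat.mod_eq_of_lt (by omega), List.getD_eq_getElem _ _ (by omega)]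
    · rw [List.getElem_append_right (by simp; omega)]
      rw [List.getElem_take]
      have : (rn + i) % m = i - (m - rn) := by
        rw [Nat.mod_eq_sub_mod (by omega), Nat.mod_eq_of_lt (by omega)]
        omega
      rw [this, List.getD_eq_getElem _ _ (by omega)]
      congr 1
      simp [hm]

-- B's triple-reversed value list is exactly the stream prefix A reads
lemma rot_eq_stream (a : List Int) (k : Int) (ha : a ≠ []) :
    a.drop (PySem.Int.mod k ((a.length : Nat) : Int)).toNat ++
      a.take (PySem.Int.mod k ((a.length : Nat) : Int)).toNat =
      (List.range a.length).map (fun (t : Nat) => streamF a (k + (t : Int))) := by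
  have hm0 : 0 < a.length := List.length_pos_iff.mpr ha
  have hmI : (0 : Int) < ((a.length : Nat) : Int) := by exact_mod_cast hm0
  have hr0 : 0 ≤ PySem.Int.mod k ((a.length : Nat) : Int) := PySem.Int.mod_nonneg k hmI
  have hrlt : PySem.Int.mod k ((a.length : Nat) : Int) < (a.length : Int) :=
    PySem.Int.mod_lt k hmI
  set r := PySem.Int.mod k ((a.length : Nat) : Int) with hrdef
  have hrn : (r.toNat : Int) = r := Int.toNat_of_nonneg hr0
  rw [drop_append_take_eq_map_range a r.toNat a.length (by omega) rfl]
  apply List.map_congr_left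
  intro t _
  have hmod : PySem.Int.mod (k + (t : Int)) (PySem.List.len a) =
      (((r.toNat + t) % a.length : Nat) : Int) := by
    have hrE : r = k % (a.length : Int) := by
      rw [hrdef, PySem.Int.mod_eq_emod_of_pos hmI]
    rw [PySem.List.len_eq, PySem.Int.mod_eq_emod_of_pos hmI]
    have h1 : (r.toNat : Int) = k % (a.length : Int) := by rw [hrn, hrE]
    push_cast
    rw [h1, Int.emod_add_emod]
  show (a.getD ((r.toNat + t) % a.length) 0) = streamF a (k + (t : Int))
  rw [streamF, hmod, PySem.List.pyGet?_natCast, List.getD_eq_getElem?_getD]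

-- ===== VERDICT =====
theorem rotateElements_spec : Claim_equal_rotateElements := by
  intro nums k _
  unfold Spec_rotateElements rotateElements rotateElements_alt
  simp only []
  set pairs := (PySem.List.enumerate nums).filter (fun p => decide (0 ≤ p.2)) with hpairs
  set a := nums.filter (fun x => decide (0 ≤ x)) with ha
  have hvals : pairs.map (·.2) = a := by
    rw [hpairs, ha]; exact map_snd_filter_enumerate nums 0
  have hlen : pairs.length = a.length := by rw [← hvals, List.length_map]
  by_cases h : pairs.length = 0
  · have haemp : a = [] := by
      have := hlen; rw [h] at this; exact List.eq_nil_of_length_eq_zero this.symm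
    simp only [h]
    apply rotALoop_all_neg
    intro x hx hxpos
    have : x ∈ a := by
      rw [ha]; exact List.mem_filter.mpr ⟨hx, by simpa⟩
    simp [haemp] at this
  · have hane : a ≠ [] := by
      intro hc
      apply h; rw [hlen, hc]; rfl
    simp only [if_neg h]
    -- triple reversal = drop ++ take
    have htriple : (((pairs.map (·.2)).take (PySem.Int.mod k ((pairs.length : Nat) : Int)).toNat).reverse ++
        ((pairs.map (·.2)).drop (PySem.Int.mod k ((pairs.length : Nat) : Int)).toNat).reverse).reverse
        = a.drop (PySem.Int.mod k ((a.length : Nat) : Int)).toNat ++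
          a.take (PySem.Int.mod k ((a.length : Nat) : Int)).toNat := by
      rw [hvals, hlen]
      simp [List.reverse_append]
    rw [htriple, rot_eq_stream a k hane]
    have hwb := writeBack_eq_scatterB nums []
      ((List.range a.length).map (fun (t : Nat) => streamF a (k + (t : Int))))
    simp only [List.nil_append, List.length_nil, Nat.cast_zero] at hwb
    rw [hwb]
    rw [scatter_stream a nums k a.length
      (by exact le_of_eq (by rw [ha, List.countP_eq_length_filter]))]
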